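-- pv_equiv track=rewrite | github.com/ianhan/ledsavers | fluere.py | build_satori_levels
-- ===== SOURCE A (Python) =====
-- def build_satori_levels(width: int, height: int) -> tuple[int, ...]:
--     max_block = 1
--     limit = max(1, min(width, height) // 4)
--     while max_block * 2 <= limit:
--         max_block *= 2
--
--     levels: list[int] = []
--     block = max_block
--     while block >= 1:
--         levels.append(block)
--         block //= 2
--     return tuple(levels)
-- ===== SOURCE B (Python) =====
-- def build_satori_levels(width: int, height: int) -> tuple[int, ...]:
--     limit = max(1, min(width, height) // 4)
--     n = limit.bit_length()  # largest power of two <= limit is 1 << (n - 1)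
--     return tuple(1 << i for i in range(n - 1, -1, -1))
-- ===== Notes on version B (the rewrite author's own statement) =====
-- stated objective: idiomatic
-- what changed: Replaces A's trial-multiply search loop for the largest power of two and its halving accumulation loop by a closed-form bit_length computation and a single range comprehension of descending powers.
import Mathlib
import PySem

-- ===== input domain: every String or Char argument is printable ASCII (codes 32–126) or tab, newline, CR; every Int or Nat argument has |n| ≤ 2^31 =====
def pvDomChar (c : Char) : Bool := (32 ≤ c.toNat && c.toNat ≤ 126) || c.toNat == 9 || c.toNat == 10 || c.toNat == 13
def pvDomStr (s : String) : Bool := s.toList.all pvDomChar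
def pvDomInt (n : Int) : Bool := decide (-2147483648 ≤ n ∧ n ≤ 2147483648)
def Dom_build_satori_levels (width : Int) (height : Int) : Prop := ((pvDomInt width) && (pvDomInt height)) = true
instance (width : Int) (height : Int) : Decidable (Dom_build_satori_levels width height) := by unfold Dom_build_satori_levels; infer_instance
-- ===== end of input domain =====

-- B replaces A's trial-multiply search loop and halving loop by a closed-form bit-length
-- computation plus one descending-range comprehension; objective: idiomatic.

-- ===== PORT A =====
-- while max_block * 2 <= limit: max_block *= 2
-- (fuel only makes the recursion total; it is always sufficient at the call site below)
def pvGrow (maxBlock limit : Int) : Nat → Int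
  | 0 => maxBlock
  | fuel+1 => if maxBlock * 2 ≤ limit then pvGrow (maxBlock * 2) limit fuel else maxBlock

-- while block >= 1: levels.append(block); block //= 2
def pvShrink (block : Int) : Nat → List Int
  | 0 => []
  | fuel+1 =>
    if 1 ≤ block then block :: pvShrink (PySem.Int.floordiv block 2) fuel else []

def build_satori_levels (width : Int) (height : Int) : List Int :=
  let limit := max 1 (PySem.Int.floordiv (min width height) 4)
  let maxBlock := pvGrow 1 limit limit.toNat
  pvShrink maxBlock (maxBlock.toNat + 1)

-- ===== PORT B =====
-- n = limit.bit_length(); return tuple(1 << i for i in range(n - 1, -1, -1))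
def build_satori_levels_alt (width : Int) (height : Int) : List Int :=
  let limit := max 1 (PySem.Int.floordiv (min width height) 4)
  let n : Nat := limit.toNat.log2 + 1   -- bit_length of a positive int
  (PySem.List.pyRange ((n : Int) - 1) (-1) (-1)).map (fun i => (2 : Int) ^ i.toNat)

-- ===== PRECONDITION & SPEC =====
def Spec_build_satori_levels (width : Int) (height : Int) (out : List Int) : Prop := out = build_satori_levels_alt width height
instance (width : Int) (height : Int) (out : List Int) : Decidable (Spec_build_satori_levels width height out) := by unfold Spec_build_satori_levels; infer_instance

-- ===== CLAIM (what is proved, stated in full; the proofs are below) =====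
def Claim_equal_build_satori_levels : Prop := ∀ (width : Int) (height : Int), Dom_build_satori_levels width height → Spec_build_satori_levels width height (build_satori_levels width height)

-- ===== LEMMAS AND PROOFS =====

def pvDesc (k : Nat) : List Int := (List.range (k+1)).map (fun j => (2 : Int) ^ (k - j))

theorem pvDesc_succ (k : Nat) : pvDesc (k+1) = (2 : Int) ^ (k+1) :: pvDesc k := by
  simp [pvDesc, List.range_succ_eq_map, List.map_map, Function.comp, Nat.succ_sub_succ]

theorem pvShrink_zero (fuel : Nat) : pvShrink 0 fuel = [] := by
  cases fuel <;> simp [pvShrink]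

theorem pvShrink_pow (k : Nat) : ∀ fuel, k + 1 ≤ fuel → pvShrink ((2 : Int) ^ k) fuel = pvDesc k := by
  induction k with
  | zero =>
    intro fuel hf
    match fuel, hf with
    | f+1, _ =>
      simp [pvShrink, pvDesc, PySem.Int.floordiv, pvShrink_zero]
  | succ k ih =>
    intro fuel hf
    match fuel, hf with
    | f+1, hf =>
      have h1 : (1 : Int) ≤ 2 ^ (k+1) := one_le_pow₀ (by norm_num)
      have hdiv : PySem.Int.floordiv ((2 : Int) ^ (k+1)) 2 = (2 : Int) ^ k := by
        have : ((2 : Int) ^ (k+1)) = (2 : Int) ^ k * 2 := by ring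
        rw [this, PySem.Int.floordiv]
        norm_num [Int.mul_fdiv_cancel]
      have hrec := ih f (by omega)
      simp only [pvShrink, if_pos h1, hdiv, hrec, pvDesc_succ]

theorem pvGrow_eq (limit : Int) (k : Nat) (hk : (2 : Int) ^ k ≤ limit)
    (hk2 : limit < (2 : Int) ^ (k+1)) :
    ∀ fuel j, j ≤ k → k - j ≤ fuel → pvGrow ((2 : Int) ^ j) limit fuel = (2 : Int) ^ k := by
  intro fuel
  induction fuel with
  | zero =>
    intro j hj hf
    have : j = k := by omega
    subst this
    rfl
  | succ f ih =>
    intro j hj hf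
    by_cases h : (2 : Int) ^ j * 2 ≤ limit
    · have hj1 : (2 : Int) ^ (j+1) ≤ limit := by
        calc (2:Int)^(j+1) = 2^j * 2 := by ring
        _ ≤ limit := h
      have hlt : j + 1 ≤ k := by
        by_contra hc
        have : k ≤ j := by omega
        have : (2 : Int) ^ (j+1) ≥ 2 ^ (k+1) :=
          pow_le_pow_right₀ (by norm_num) (by omega)
        omega
      have := ih (j+1) hlt (by omega)
      simpa [pvGrow, h, pow_succ] using this
    · have : k ≤ j := by
        by_contra hc
        have hjk : j + 1 ≤ k := by omega
        have : (2 : Int) ^ (j+1) ≤ 2 ^ k :=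
          pow_le_pow_right₀ (by norm_num) hjk
        have : (2 : Int) ^ j * 2 ≤ 2 ^ k := by
          calc (2:Int)^j * 2 = 2^(j+1) := by ring
          _ ≤ 2^k := this
        omega
      have hjk : j = k := by omega
      subst hjk
      simp [pvGrow, h]

theorem pyRange_desc (k : Nat) :
    (PySem.List.pyRange (((k : Nat) : Int)) (-1) (-1)).map (fun i => (2 : Int) ^ i.toNat) = pvDesc k := by
  rw [PySem.List.pyRange_neg_one]
  have hlen : (((k : Nat) : Int) - (-1)).toNat = k + 1 := by omega
  rw [hlen, List.map_map, pvDesc]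
  apply List.map_congr_left
  intro j hj
  have hj' : j < k + 1 := List.mem_range.mp hj
  have : (((k : Nat) : Int) - (j : Nat)).toNat = k - j := by omega
  simp [Function.comp, this]

-- ===== VERDICT (by name: the statement is the Claim_ definition above) =====
theorem build_satori_levels_spec : Claim_equal_build_satori_levels := by
  intro width height _
  unfold Spec_build_satori_levels build_satori_levels build_satori_levels_alt
  dsimp only
  set limit := max 1 (PySem.Int.floordiv (min width height) 4) with hlim
  have h1 : (1 : Int) ≤ limit := le_max_left _ _
  have hnn : (0 : Int) ≤ limit := by omega
  set n := limit.toNat with hn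
  have hncast : (n : Int) = limit := Int.toNat_of_nonneg hnn
  have hnpos : 1 ≤ n := by omega
  set k := n.log2 with hk
  have hlow : 2 ^ k ≤ n := Nat.log2_self_le (by omega)
  have hhigh : n < 2 ^ (k + 1) := Nat.lt_log2_self
  have hklt : k < 2 ^ k := Nat.lt_two_pow_self
  have hlowI : (2 : Int) ^ k ≤ limit := by
    rw [← hncast]; exact_mod_cast hlow
  have hhighI : limit < (2 : Int) ^ (k + 1) := by
    rw [← hncast]; exact_mod_cast hhigh
  have hgrow : pvGrow 1 limit n = (2 : Int) ^ k := by
    have := pvGrow_eq limit k hlowI hhighI n 0 (Nat.zero_le _) (by omega)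
    simpa using this
  rw [hgrow]
  have htn : ((2 : Int) ^ k).toNat = 2 ^ k := by
    have h2 : ((2 : Int) ^ k) = ((2 ^ k : Nat) : Int) := by push_cast; ring
    rw [h2, Int.toNat_natCast]
  rw [htn, pvShrink_pow k (2 ^ k + 1) (by omega)]
  have hcast : ((k + 1 : Nat) : Int) - 1 = ((k : Nat) : Int) := by push_cast; ring
  rw [hcast, pyRange_desc]
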